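-- pv_equiv track=rewrite | github.com/mishkFrede1/Fit-stats-Bot | utils/sort_week_days.py | sort_week_days
-- ===== SOURCE A (Python) =====
-- day_ids = {
--     "monday": 1,
--     "tuesday": 2,
--     "wednesday": 3,
--     "thursday": 4,
--     "friday": 5,
--     "saturday": 6,
--     "sunday": 7
-- }
--
-- rus_day_ids = {
--     1: "Понедельник",
--     2: "Вторник",
--     3: "Среда",
--     4: "Четверг",
--     5: "Пятница",
--     6: "Суббота",
--     7: "Воскресенье"
-- }
--
-- def sort_week_days(days: list):
--     int_days = []
--     for day in days:
--         int_days.append(day_ids[day])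
--
--     int_days = sorted(int_days)
--
--     result = []
--     for day in int_days:
--         result.append(rus_day_ids[day])
--
--     return ", ".join(result)
-- ===== SOURCE B (Python) =====
-- day_ids = {
--     "monday": 1,
--     "tuesday": 2,
--     "wednesday": 3,
--     "thursday": 4,
--     "friday": 5,
--     "saturday": 6,
--     "sunday": 7
-- }
--
-- rus_day_ids = {
--     1: "Понедельник",
--     2: "Вторник",
--     3: "Среда",
--     4: "Четверг",
--     5: "Пятница",
--     6: "Суббота",
--     7: "Воскресенье"
-- }
--
-- def sort_week_days(days: list):
--     # counting sort over the fixed key range 1..7 instead of comparison sorting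
--     counts = {}
--     for day in days:
--         i = day_ids[day]
--         counts[i] = counts.get(i, 0) + 1
--     result = []
--     for i in range(1, 8):
--         result += [rus_day_ids[i]] * counts.get(i, 0)
--     return ", ".join(result)
-- ===== Notes on version B (the rewrite author's own statement) =====
-- stated objective: alternative
-- what changed: Replaces mapping-to-ids + comparison sort + mapping back with a single counting pass over the fixed id range 1..7 (counting sort): count each day's id, then emit each Russian name count-many times in fixed order.
import Mathlib
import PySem

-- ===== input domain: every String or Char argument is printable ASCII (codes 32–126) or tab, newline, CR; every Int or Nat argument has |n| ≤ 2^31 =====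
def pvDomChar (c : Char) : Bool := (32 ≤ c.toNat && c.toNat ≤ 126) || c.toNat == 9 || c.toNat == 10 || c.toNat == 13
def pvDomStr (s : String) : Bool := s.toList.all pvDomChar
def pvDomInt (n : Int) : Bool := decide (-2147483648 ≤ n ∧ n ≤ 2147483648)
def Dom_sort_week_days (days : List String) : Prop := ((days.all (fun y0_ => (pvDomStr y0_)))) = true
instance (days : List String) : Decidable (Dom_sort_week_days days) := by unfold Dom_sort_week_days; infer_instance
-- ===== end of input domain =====

-- B replaces map-to-ids + comparison sort + map-back by a counting pass over the fixed id range 1..7 (counting sort); alternative algorithm, same result.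


-- ===== PORT A =====
def pvDayIds : PySem.Dict String Int :=
  PySem.Dict.ofList [("monday", 1), ("tuesday", 2), ("wednesday", 3), ("thursday", 4),
                     ("friday", 5), ("saturday", 6), ("sunday", 7)]

def pvRusDayIds : PySem.Dict Int String :=
  PySem.Dict.ofList [(1, "Понедельник"), (2, "Вторник"), (3, "Среда"), (4, "Четверг"),
                     (5, "Пятница"), (6, "Суббота"), (7, "Воскресенье")]

def sort_week_days (days : List String) : String :=
  let int_days := days.foldl (fun acc day => acc ++ [pvDayIds.getD day 0]) []
  let int_days := PySem.List.sorted int_days (fun x => x) false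
  let result := int_days.foldl (fun acc day => acc ++ [pvRusDayIds.getD day ""]) []
  PySem.Str.join ", " result

-- ===== PORT B =====
def sort_week_days_alt (days : List String) : String :=
  let counts := days.foldl
    (fun d day => d.insert (pvDayIds.getD day 0) (d.getD (pvDayIds.getD day 0) 0 + 1))
    PySem.Dict.empty
  let result := (PySem.List.pyRange 1 8 1).foldl
    (fun acc i => acc ++ PySem.List.pyRepeat [pvRusDayIds.getD i ""] (counts.getD i 0)) []
  PySem.Str.join ", " result

-- ===== PRECONDITION & SPEC =====
-- Pre_ excludes exactly the inputs containing a string that is not a day_ids key, on which A raises KeyError.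
def Pre_sort_week_days (days : List String) : Prop :=
  (days.all (fun d => d ∈ ["monday", "tuesday", "wednesday", "thursday", "friday", "saturday", "sunday"])) = true
instance (days : List String) : Decidable (Pre_sort_week_days days) := by unfold Pre_sort_week_days; infer_instance
def pvWitness_sort_week_days : List String := ["sunday", "monday", "monday"]

def Spec_sort_week_days (days : List String) (out : String) : Prop := out = sort_week_days_alt days
instance (days : List String) (out : String) : Decidable (Spec_sort_week_days days out) := by unfold Spec_sort_week_days; infer_instance

-- ===== CLAIM (what is proved, stated in full; the proofs are below) =====
def Claim_equal_sort_week_days : Prop := ∀ (days : List String), Dom_sort_week_days days → Pre_sort_week_days days → Spec_sort_week_days days (sort_week_days days)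

-- ===== LEMMAS AND PROOFS =====

-- the sorted list of ids (all in 1..7), written as counting sort writes it
def pvCanon (m : List Int) : List Int :=
  List.replicate (m.count 1) 1 ++ List.replicate (m.count 2) 2 ++ List.replicate (m.count 3) 3 ++
  List.replicate (m.count 4) 4 ++ List.replicate (m.count 5) 5 ++ List.replicate (m.count 6) 6 ++
  List.replicate (m.count 7) 7

theorem pvCanon_perm (m : List Int) (hm : ∀ x ∈ m, 1 ≤ x ∧ x ≤ 7) : (pvCanon m).Perm m := by
  rw [List.perm_iff_count]
  intro a
  simp only [pvCanon, List.count_append, List.count_replicate]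
  by_cases h1 : a = 1 <;> by_cases h2 : a = 2 <;> by_cases h3 : a = 3 <;> by_cases h4 : a = 4 <;>
    by_cases h5 : a = 5 <;> by_cases h6 : a = 6 <;> by_cases h7 : a = 7 <;> subst_vars <;>
    simp_all
  have h0 : List.count a m = 0 := by
    rw [List.count_eq_zero]
    intro hx
    exact absurd (hm a hx) (by omega)
  split_ifs <;> omega

theorem pvCanon_pairwise (m : List Int) : List.Pairwise (· ≤ ·) (pvCanon m) := by
  simp only [pvCanon, List.pairwise_append, List.pairwise_replicate, List.mem_append,
    List.mem_replicate]
  norm_num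
  refine ⟨⟨⟨⟨?_, ?_⟩, ?_⟩, ?_⟩, ?_⟩ <;> intro a h _ <;> omega

-- ===== VERDICT (by name: the statement is the Claim_ definition above) =====
theorem sort_week_days_spec : Claim_equal_sort_week_days := by
  intro days _ hpre
  unfold Spec_sort_week_days sort_week_days sort_week_days_alt
  simp only [PySem.List.foldl_append_singleton_eq_map, List.nil_append]
  have hmem : ∀ x ∈ days.map (fun d => pvDayIds.getD d 0), 1 ≤ x ∧ x ≤ 7 := by
    intro x hx
    obtain ⟨d, hd, rfl⟩ := List.mem_map.mp hx
    have hd7 := List.all_eq_true.mp hpre d hd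
    simp only [List.mem_cons, List.not_mem_nil, or_false, decide_eq_true_eq] at hd7
    rcases hd7 with rfl | rfl | rfl | rfl | rfl | rfl | rfl <;> decide
  rw [PySem.List.sorted_id_eq_of_perm_of_pairwise _ _
        (pvCanon_perm _ hmem) (pvCanon_pairwise _)]
  have hc : ∀ i : Int,
      (days.foldl (fun d day => d.insert (pvDayIds.getD day 0)
          (d.getD (pvDayIds.getD day 0) 0 + 1)) PySem.Dict.empty).getD i 0
        = (List.count i (days.map (fun d => pvDayIds.getD d 0)) : Int) := by
    intro i
    rw [← List.foldl_map (f := fun d => pvDayIds.getD d 0)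
          (g := fun (d : PySem.Dict Int Int) x => d.insert x (d.getD x 0 + 1))]
    rw [PySem.Dict.getD_foldl_insert_add_one]
    simp [PySem.Dict.getD_empty]
  have hrange : PySem.List.pyRange 1 8 1 = [1, 2, 3, 4, 5, 6, 7] := by decide
  rw [hrange]
  simp only [List.foldl_cons, List.foldl_nil, hc, PySem.List.pyRepeat_singleton,
    Int.toNat_natCast, List.nil_append]
  simp [pvCanon, List.map_append, List.map_replicate, List.append_assoc]
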